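-- pv_equiv track=rewrite | github.com/Jachuu123/Studia-Zadania | 11.2.py | permutacyjna_postac_normalna
-- ===== SOURCE A (Python) =====
-- def permutacyjna_postac_normalna(slowo):
--     # Tworzymy słownik, który będzie mapował litery na liczby
--     mapa_liter = {}
--     licznik = 1
--
--     # Lista, która będzie przechowywała numery odpowiadające literom
--     wynik = []
--
--     for litera in slowo:
--         # Jeśli litera nie była jeszcze odwiedzona, przypisujemy jej nową liczbę
--         if litera not in mapa_liter:
--             mapa_liter[litera] = licznik
--             licznik += 1
--
--         # Dodajemy odpowiedni numer do wyniku
--         wynik.append(str(mapa_liter[litera]))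
--
--     # Łączymy liczby w jedną wartość z separatorem "-"
--     return "-".join(wynik)
-- ===== SOURCE B (Python) =====
-- def permutacyjna_postac_normalna(slowo):
--     # first-occurrence positions of the distinct letters, in increasing order
--     pierwsze = sorted(slowo.index(c) for c in set(slowo))
--     # a letter's number = rank of its first-occurrence position among those positions
--     return "-".join(str(pierwsze.index(slowo.index(c)) + 1) for c in slowo)
-- ===== Notes on version B (the rewrite author's own statement) =====
-- stated objective: alternative
-- what changed: A builds an incremental letter-to-ordinal dict with a running counter while producing the output; B builds no table: it sorts the first-occurrence positions of the distinct letters and numbers each letter by the rank of its first occurrence in that sorted list.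
import Mathlib
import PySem

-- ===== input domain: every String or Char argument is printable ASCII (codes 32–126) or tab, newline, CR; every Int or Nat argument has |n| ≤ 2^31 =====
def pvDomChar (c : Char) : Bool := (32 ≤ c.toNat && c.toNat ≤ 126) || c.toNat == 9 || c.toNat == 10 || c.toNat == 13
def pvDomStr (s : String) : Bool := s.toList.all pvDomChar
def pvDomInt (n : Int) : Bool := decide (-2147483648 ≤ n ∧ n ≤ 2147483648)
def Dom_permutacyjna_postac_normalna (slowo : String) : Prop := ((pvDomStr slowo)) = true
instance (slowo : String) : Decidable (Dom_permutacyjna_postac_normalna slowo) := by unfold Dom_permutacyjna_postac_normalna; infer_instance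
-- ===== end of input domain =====

-- B replaces A's incremental dict+counter loop by sort-based ranking: sort the first-occurrence
-- positions of the distinct letters, then each letter's number is the rank of its first
-- occurrence in that sorted list (alternative algorithm; no letter-to-number table).

-- ===== PORT A =====
-- one loop iteration of A: maybe assign a fresh number, then append str(mapa_liter[litera])
-- (mapa_liter[litera] is read right after the key is guaranteed present, so getD's default 0 is never used)
def pvAStep (st : PySem.Dict Char Int × Int × List (List Char)) (c : Char) :
    PySem.Dict Char Int × Int × List (List Char) :=
  let (mapa, licznik, wynik) := st
  let (mapa, licznik) :=
    if mapa.contains c = false then (mapa.insert c licznik, licznik + 1) else (mapa, licznik)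
  (mapa, licznik, wynik ++ [PySem.Int.toChars (mapa.getD c 0)])

def permutacyjna_postac_normalna (slowo : String) : String :=
  String.ofList (PySem.Chars.join "-".toList
    ((slowo.toList.foldl pvAStep (PySem.Dict.empty, 1, [])).2.2))

-- ===== PORT B =====
-- sorted(slowo.index(c) for c in set(slowo)); the result of sorted does not depend on the
-- set's iteration order, so iterating PySem.Set's first-insertion order is exact here
def pvFirsts (cs : List Char) : List Int :=
  PySem.List.sorted
    ((PySem.Set.ofList cs).map (fun c => ((PySem.List.index? cs c).getD 0 : Int)))
    (fun x => x) false

-- str(pierwsze.index(slowo.index(c)) + 1) for one character c of slowo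
-- (both .index calls cannot raise here since c is drawn from slowo, so index?'s default 0 is never used)
def pvBRank (cs : List Char) (pierwsze : List Int) (c : Char) : List Char :=
  PySem.Int.toChars
    (((PySem.List.index? pierwsze ((PySem.List.index? cs c).getD 0 : Int)).getD 0 : Int) + 1)

def permutacyjna_postac_normalna_alt (slowo : String) : String :=
  String.ofList (PySem.Chars.join "-".toList
    (slowo.toList.map (pvBRank slowo.toList (pvFirsts slowo.toList))))

-- ===== PRECONDITION & SPEC =====
def Spec_permutacyjna_postac_normalna (slowo : String) (out : String) : Prop := out = permutacyjna_postac_normalna_alt slowo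
instance (slowo : String) (out : String) : Decidable (Spec_permutacyjna_postac_normalna slowo out) := by unfold Spec_permutacyjna_postac_normalna; infer_instance

-- ===== CLAIM (what is proved, stated in full; the proofs are below) =====
def Claim_equal_permutacyjna_postac_normalna : Prop := ∀ (slowo : String), Dom_permutacyjna_postac_normalna slowo → Spec_permutacyjna_postac_normalna slowo (permutacyjna_postac_normalna slowo)

-- ===== LEMMAS AND PROOFS =====

-- A's dict keys in insertion order, as a growing ordered-distinct list
def pvDedup (u l : List Char) : List Char :=
  l.foldl (fun acc c => if c ∈ acc then acc else acc ++ [c]) u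

lemma pvDedup_eq_ofList (l : List Char) : pvDedup [] l = PySem.Set.ofList l := by
  have h : (fun (acc : List Char) c => if c ∈ acc then acc else acc ++ [c]) = PySem.Set.add := by
    funext s c
    rw [PySem.Set.add_eq_ite]
  rw [pvDedup, h, PySem.Set.ofList_eq_foldl]

-- the dict A has built after the letters u (distinct, in order): litera ↦ its 1-based position in u
def pvMapa (u : List Char) : PySem.Dict Char Int :=
  (PySem.List.enumerate u 0).foldl (fun d p => d.insert p.2 (p.1 + 1)) PySem.Dict.empty

lemma pvMapa_items (u : List Char) (hu : u.Nodup) :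
    (pvMapa u).items = (PySem.List.enumerate u 0).map (fun p => (p.2, p.1 + 1)) := by
  unfold pvMapa
  rw [PySem.Dict.items_foldl_insert_fresh]
  · rfl
  · simp
  · simp [PySem.List.map_snd_enumerate, hu]

lemma pvMapa_keys_nodup (u : List Char) : (pvMapa u).keys.Nodup := by
  unfold pvMapa
  exact PySem.Dict.nodup_keys_foldl_insert_key _ _ _ _ PySem.Dict.nodup_keys_empty

lemma pvMapa_getD (u : List Char) (hu : u.Nodup) (c : Char) (hc : c ∈ u) :
    (pvMapa u).getD c 0 = (u.idxOf c : Int) + 1 := by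
  have hlt := List.idxOf_lt_length_of_mem hc
  have hmem : (c, (u.idxOf c : Int) + 1) ∈ (pvMapa u).items := by
    rw [pvMapa_items u hu]
    simp only [List.mem_map, PySem.List.mem_enumerate_iff]
    exact ⟨(↑(u.idxOf c), c), ⟨u.idxOf c, hlt, by simp [List.getElem_idxOf]⟩, rfl⟩
  exact PySem.Dict.getD_of_mem_items _ hmem (pvMapa_keys_nodup u) 0

lemma pvMapa_contains (u : List Char) (c : Char) :
    (pvMapa u).contains c = decide (c ∈ u) := by
  rw [PySem.Dict.contains_eq_decide_mem_keys]
  congr 1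
  unfold pvMapa
  rw [PySem.Dict.keys_foldl_insert_key]
  rw [PySem.Dict.keys_empty, PySem.List.map_snd_enumerate, PySem.Set.update_nil_left]
  exact propext (PySem.Set.mem_ofList u c)

lemma pvMapa_snoc (u : List Char) (c : Char) :
    pvMapa (u ++ [c]) = (pvMapa u).insert c ((u.length : Int) + 1) := by
  unfold pvMapa
  rw [PySem.List.enumerate_append, List.foldl_append]
  simp [PySem.List.enumerate_cons, PySem.List.enumerate_nil]

lemma pvDedup_prefix (l u : List Char) : ∃ t, pvDedup u l = u ++ t := by
  induction l generalizing u with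
  | nil => exact ⟨[], by simp [pvDedup]⟩
  | cons c rest ih =>
    by_cases h : c ∈ u
    · obtain ⟨t, ht⟩ := ih u
      exact ⟨t, by simpa [pvDedup, h] using ht⟩
    · obtain ⟨t, ht⟩ := ih (u ++ [c])
      exact ⟨[c] ++ t, by simp [pvDedup, h] at ht ⊢; simpa using ht⟩

lemma pvIdx_stable (u t : List Char) (c : Char) (h : c ∈ u) :
    (u ++ t).idxOf c = u.idxOf c := List.idxOf_append_of_mem h

-- the main invariant of A's loop: run from state (pvMapa u, |u|+1, w) it appends, for each letter c,
-- c's 1-based position among the distinct letters collected so far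
lemma pvA_loop (l : List Char) (u : List Char) (w : List (List Char)) (hu : u.Nodup) :
    l.foldl pvAStep (pvMapa u, (u.length : Int) + 1, w)
      = (pvMapa (pvDedup u l), ((pvDedup u l).length : Int) + 1,
         w ++ l.map (fun c => PySem.Int.toChars (((pvDedup u l).idxOf c : Int) + 1))) := by
  induction l generalizing u w with
  | nil => simp [pvDedup]
  | cons c rest ih =>
    by_cases h : c ∈ u
    · have hded : pvDedup u (c :: rest) = pvDedup u rest := by simp [pvDedup, h]
      have hidx : ((pvDedup u rest).idxOf c : Int) + 1 = ((u.idxOf c : Int) + 1) := by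
        obtain ⟨t, ht⟩ := pvDedup_prefix rest u
        rw [ht, pvIdx_stable u t c h]
      rw [List.foldl_cons]
      have hstep : pvAStep (pvMapa u, (u.length : Int) + 1, w) c
          = (pvMapa u, (u.length : Int) + 1, w ++ [PySem.Int.toChars ((u.idxOf c : Int) + 1)]) := by
        simp [pvAStep, pvMapa_contains, h, pvMapa_getD u hu c h]
      rw [hstep, ih u _ hu, hded]
      simp [hidx]
    · have hded : pvDedup u (c :: rest) = pvDedup (u ++ [c]) rest := by simp [pvDedup, h]
      have hidx : ((pvDedup (u ++ [c]) rest).idxOf c : Int) + 1 = (u.length : Int) + 1 := by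
        obtain ⟨t, ht⟩ := pvDedup_prefix rest (u ++ [c])
        rw [ht, pvIdx_stable (u ++ [c]) t c (by simp),
            List.idxOf_append_of_notMem h, List.idxOf_cons_self]
        omega
      rw [List.foldl_cons]
      have hstep : pvAStep (pvMapa u, (u.length : Int) + 1, w) c
          = (pvMapa (u ++ [c]), (u.length : Int) + 1 + 1,
             w ++ [PySem.Int.toChars ((u.length : Int) + 1)]) := by
        simp only [pvAStep, pvMapa_contains, h]
        rw [pvMapa_snoc]
        simp [PySem.Dict.getD_insert_self]
      rw [hstep]
      have hlen : ((u ++ [c]).length : Int) + 1 = (u.length : Int) + 1 + 1 := by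
        rw [List.length_append, List.length_singleton]
        omega
      rw [← hlen, ih (u ++ [c]) _ (by rw [List.nodup_append]; exact ⟨hu, List.nodup_singleton c, by intro a ha b hb; rw [List.mem_singleton] at hb; subst hb; intro e; exact h (e ▸ ha)⟩), hded]
      simp [hidx]

-- set(xs ++ ys) extends set(xs) on the right
lemma pvOfList_prefix (xs ys : List Char) :
    ∃ t, PySem.Set.ofList (xs ++ ys) = PySem.Set.ofList xs ++ t :=
  ⟨_, by rw [PySem.Set.ofList_append, PySem.Set.update_eq_append_filter]⟩

-- c does not occur strictly before its first occurrence
lemma pvNot_mem_take_idxOf (l : List Char) (c : Char) :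
    c ∉ l.take (l.idxOf c) := by
  intro hmem
  have h1 : l.idxOf c = (l.take (l.idxOf c)).idxOf c := by
    conv_lhs => rw [← List.take_append_drop (l.idxOf c) l]
    exact List.idxOf_append_of_mem hmem
  have h2 := List.idxOf_lt_length_of_mem hmem
  have h3 : (l.take (l.idxOf c)).length ≤ l.idxOf c := by
    simp [List.length_take]
  omega

-- the distinct letters of the prefix ending at c's first occurrence: those before it, then c
lemma pvOfList_take_succ (l : List Char) (c : Char) (hc : c ∈ l) :
    PySem.Set.ofList (l.take (l.idxOf c + 1))
      = PySem.Set.ofList (l.take (l.idxOf c)) ++ [c] := by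
  have hlt := List.idxOf_lt_length_of_mem hc
  have htake : l.take (l.idxOf c + 1) = l.take (l.idxOf c) ++ [c] := by
    rw [List.take_add_one]
    congr 1
    rw [List.getElem?_eq_getElem hlt, List.getElem_idxOf]
    rfl
  rw [htake, PySem.Set.ofList_append_singleton, PySem.Set.add_of_not_mem]
  rw [PySem.Set.mem_ofList]
  exact pvNot_mem_take_idxOf l c

-- position of c in set(cs): everything before c in set(cs) is set of the letters before c's first occurrence
lemma pvOfList_split (cs : List Char) (c : Char) (hc : c ∈ cs) :
    ∃ t, PySem.Set.ofList cs = PySem.Set.ofList (cs.take (cs.idxOf c)) ++ c :: t := by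
  obtain ⟨t, ht⟩ := pvOfList_prefix (cs.take (cs.idxOf c + 1)) (cs.drop (cs.idxOf c + 1))
  rw [List.take_append_drop] at ht
  rw [pvOfList_take_succ cs c hc] at ht
  exact ⟨t, by rw [ht, List.append_assoc]; rfl⟩

-- a member of the prefix before position k has its first occurrence before k
lemma pvIdxOf_lt_of_mem_take (cs : List Char) (k : Nat) (d : Char) (hd : d ∈ cs.take k) :
    cs.idxOf d < k := by
  have h1 : cs.idxOf d = (cs.take k).idxOf d := by
    conv_lhs => rw [← List.take_append_drop k cs]
    exact List.idxOf_append_of_mem hd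
  have h2 := List.idxOf_lt_length_of_mem hd
  have h3 : (cs.take k).length ≤ k := by simp [List.length_take]
  omega

lemma pvIdxOf_ofList (cs : List Char) (c : Char) (hc : c ∈ cs) :
    (PySem.Set.ofList cs).idxOf c = (PySem.Set.ofList (cs.take (cs.idxOf c))).length := by
  obtain ⟨t, ht⟩ := pvOfList_split cs c hc
  have hnot : c ∉ PySem.Set.ofList (cs.take (cs.idxOf c)) := by
    rw [PySem.Set.mem_ofList]
    exact pvNot_mem_take_idxOf cs c
  rw [ht, List.idxOf_append_of_notMem hnot, List.idxOf_cons_self]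
  omega

-- the distinct letters of cs, in first-occurrence order, have strictly increasing first occurrences
lemma pvOfList_pairwise (cs : List Char) :
    (PySem.Set.ofList cs).Pairwise (fun a b => cs.idxOf a < cs.idxOf b) := by
  rw [List.pairwise_iff_getElem]
  intro i j hi hj hij
  have hcj : (PySem.Set.ofList cs)[j] ∈ cs :=
    (PySem.Set.mem_ofList cs _).mp (List.getElem_mem hj)
  obtain ⟨t, ht⟩ := pvOfList_split cs _ hcj
  have hidx := (PySem.Set.nodup_ofList cs).idxOf_getElem j hj
  have hjpos : j
      = (PySem.Set.ofList (cs.take (cs.idxOf (PySem.Set.ofList cs)[j]))).length := by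
    conv_lhs => rw [← hidx]
    rw [pvIdxOf_ofList cs _ hcj]
  have hilt : i < (PySem.Set.ofList (cs.take (cs.idxOf (PySem.Set.ofList cs)[j]))).length := by
    omega
  have hgl := List.getElem_of_eq ht hi
  rw [List.getElem_append_left hilt] at hgl
  have hui : (PySem.Set.ofList cs)[i] ∈ cs.take (cs.idxOf (PySem.Set.ofList cs)[j]) := by
    rw [← PySem.Set.mem_ofList]
    rw [hgl]
    exact List.getElem_mem hilt
  exact pvIdxOf_lt_of_mem_take cs _ _ hui

-- slowo.index(c) in the ports, resolved: (index? l v).getD 0 = l.idxOf v when v ∈ l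
lemma pvIndex_getD {α : Type} [BEq α] [LawfulBEq α] (l : List α) (v : α) (hv : v ∈ l) :
    (PySem.List.index? l v).getD 0 = l.idxOf v := by
  rw [PySem.List.index?_eq_idxOf?]
  cases hsome : List.idxOf? v l with
  | none => exact absurd (List.idxOf?_eq_none_iff.mp hsome) (by simpa using hv)
  | some k => rw [List.idxOf_eq_getD_idxOf?, hsome]; rfl

-- sorted() is the identity on the already strictly increasing first-occurrence list
lemma pvFirsts_eq (cs : List Char) :
    pvFirsts cs = (PySem.Set.ofList cs).map (fun c => (cs.idxOf c : Int)) := by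
  unfold pvFirsts
  have hmap : (PySem.Set.ofList cs).map (fun c => ((PySem.List.index? cs c).getD 0 : Int))
      = (PySem.Set.ofList cs).map (fun c => (cs.idxOf c : Int)) := by
    apply List.map_congr_left
    intro c hc
    rw [pvIndex_getD cs c ((PySem.Set.mem_ofList cs c).mp hc)]
  rw [hmap]
  apply PySem.List.sorted_eq_of_perm_of_pairwise_lt _ _ _ (List.Perm.refl _)
  rw [List.pairwise_map]
  exact List.Pairwise.imp (fun h => by exact_mod_cast h) (pvOfList_pairwise cs)

-- idxOf through map by a function injective on the list's members relative to c
lemma pvIdxOf_map (u : List Char) (f : Char → Int) (c : Char)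
    (h : ∀ d ∈ u, f d = f c → d = c) :
    (u.map f).idxOf (f c) = u.idxOf c := by
  induction u with
  | nil => rfl
  | cons d rest ih =>
    by_cases hdc : d = c
    · subst hdc
      simp
    · have hfd : ¬ (f d = f c) := fun e => hdc (h d (by simp) e)
      rw [List.map_cons, List.idxOf_cons_ne _ (by simpa using hfd),
          List.idxOf_cons_ne _ (by simpa using hdc), ih (fun e he => h e (by simp [he]))]

-- ===== VERDICT (by name: the statement is the Claim_ definition above) =====
theorem permutacyjna_postac_normalna_spec : Claim_equal_permutacyjna_postac_normalna := by
  intro slowo _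
  unfold Spec_permutacyjna_postac_normalna permutacyjna_postac_normalna permutacyjna_postac_normalna_alt
  have hA := pvA_loop slowo.toList [] [] List.nodup_nil
  have h0 : pvMapa [] = (PySem.Dict.empty : PySem.Dict Char Int) := rfl
  rw [h0] at hA
  simp only [List.length_nil, Nat.cast_zero, zero_add, List.nil_append] at hA
  simp only [hA]
  congr 2
  apply List.map_congr_left
  intro c hc
  set cs := slowo.toList with hcs
  unfold pvBRank
  rw [pvIndex_getD cs c hc, pvFirsts_eq cs, pvDedup_eq_ofList]
  have hmem : ((cs.idxOf c : Nat) : Int) ∈ (PySem.Set.ofList cs).map (fun d => (cs.idxOf d : Int)) := by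
    exact List.mem_map_of_mem ((PySem.Set.mem_ofList cs c).mpr hc)
  rw [pvIndex_getD _ _ hmem]
  have hinj : ∀ d ∈ PySem.Set.ofList cs, ((cs.idxOf d : Nat) : Int) = ((cs.idxOf c : Nat) : Int) → d = c := by
    intro d hd he
    have hd' : d ∈ cs := (PySem.Set.mem_ofList cs d).mp hd
    have hn : cs.idxOf d = cs.idxOf c := by exact_mod_cast he
    have h1 := List.getElem_idxOf (List.idxOf_lt_length_of_mem hd')
    have h2 := List.getElem_idxOf (List.idxOf_lt_length_of_mem hc)
    rw [← h1, ← h2]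
    congr 1
  rw [pvIdxOf_map (PySem.Set.ofList cs) (fun d => (cs.idxOf d : Int)) c hinj]
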